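-- pv_equiv track=rewrite | github.com/robertchen2021/ucm-test-rc | nauto-zoo/build/lib/nauto_zoo/models/visual_backup_detector/visual_backup_detector.py | generate_judgement_from_preds
-- ===== SOURCE A (Python) =====
-- import collections
--
-- def generate_judgement_from_preds(preds, backup_p99_treshold, time_buffer_threshold, iva_release_threshold):
--     time_buffer_count = 0
--     iva_triggerd = False
--     iva_release = False
--     iva_release_deque = collections.deque([0] * iva_release_threshold)
--
--     for backup_score in preds:
--         iva_release_deque.popleft()
--         if backup_score >= backup_p99_treshold:
--             time_buffer_count += 1
--             iva_release_deque.append(0)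
--         else:
--             iva_release_deque.append(1)
--             if time_buffer_count > 0:
--                 time_buffer_count -= 1
--
--         iva_release_count = sum(iva_release_deque)
--         if iva_triggerd and iva_release_count >= iva_release_threshold:
--             iva_triggerd = False
--             time_buffer_count = 0
--
--             # trigger IVA
--         if time_buffer_count >= time_buffer_threshold:
--             iva_triggerd = True
--             break
--     return iva_triggerd
-- ===== SOURCE B (Python) =====
-- def generate_judgement_from_preds(preds, backup_p99_treshold, time_buffer_threshold, iva_release_threshold):
--     # Max-drawdown (Kadane-style) reformulation: A's clamped streak counter after
--     # step i equals S_i - min_{j<=i} S_j, where S is the prefix sum of +1 (score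
--     # above threshold) / -1 steps.  Stage 1 builds the prefix sums; stage 2 scans
--     # them with a running minimum and triggers when the rise from the minimum
--     # reaches time_buffer_threshold.
--     prefix = []
--     s = 0
--     for score in preds:
--         s += 1 if score >= backup_p99_treshold else -1
--         prefix.append(s)
--     m = 0
--     for v in prefix:
--         if m > v:
--             m = v
--         if v - m >= time_buffer_threshold:
--             return True
--     return False
-- ===== Notes on version B (the rewrite author's own statement) =====
-- stated objective: faster
-- what changed: B replaces A's clamped streak counter with deque re-summing by a max-drawdown formulation: it builds the +-1 prefix-sum sequence in one pass, then scans it with a running minimum and triggers when prefix[i] - min(prefix[0..i]) reaches the buffer threshold.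
import Mathlib
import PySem

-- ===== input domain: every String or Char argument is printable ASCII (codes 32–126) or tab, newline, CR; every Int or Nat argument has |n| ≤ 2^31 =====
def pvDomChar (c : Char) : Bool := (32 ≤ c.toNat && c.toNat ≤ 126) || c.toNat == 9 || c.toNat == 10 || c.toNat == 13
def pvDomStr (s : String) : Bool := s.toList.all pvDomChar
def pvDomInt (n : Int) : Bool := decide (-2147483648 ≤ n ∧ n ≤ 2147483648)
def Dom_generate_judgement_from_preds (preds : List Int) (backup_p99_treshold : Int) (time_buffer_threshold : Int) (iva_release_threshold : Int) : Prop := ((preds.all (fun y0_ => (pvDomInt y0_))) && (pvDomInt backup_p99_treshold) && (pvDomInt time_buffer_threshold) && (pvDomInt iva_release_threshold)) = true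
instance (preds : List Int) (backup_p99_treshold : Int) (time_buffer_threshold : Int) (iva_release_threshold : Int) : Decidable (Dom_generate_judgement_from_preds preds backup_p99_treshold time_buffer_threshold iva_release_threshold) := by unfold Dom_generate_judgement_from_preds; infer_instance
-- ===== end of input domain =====

-- B recasts A's clamped counter (with per-step deque re-summing) as a prefix-sum/running-minimum (max-drawdown) scan; measured faster.


-- ===== PORT A =====
-- loop state: time_buffer_count, iva_triggerd, iva_release_deque (deque as List Int);
-- 'break' then 'return iva_triggerd' is rendered as returning true at the break site.
def pvALoop (bp tb k : Int) : List Int → Int → Bool → List Int → Bool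
  | [], _, trig, _ => trig
  | s :: rest, tbc, trig, deq =>
    let deq1 := deq.tail   -- popleft (Python raises on the empty deque; Pre_ excludes that)
    let st :=
      if s ≥ bp then (tbc + 1, deq1 ++ [(0 : Int)])
      else ((if tbc > 0 then tbc - 1 else tbc), deq1 ++ [(1 : Int)])
    let cnt := st.2.sum
    let st2 := if trig ∧ cnt ≥ k then (false, (0 : Int)) else (trig, st.1)
    if st2.2 ≥ tb then true
    else pvALoop bp tb k rest st2.2 st2.1 st.2

def generate_judgement_from_preds (preds : List Int) (backup_p99_treshold : Int) (time_buffer_threshold : Int) (iva_release_threshold : Int) : Bool :=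
  pvALoop backup_p99_treshold time_buffer_threshold iva_release_threshold preds 0 false (List.replicate iva_release_threshold.toNat 0)

-- ===== PORT B =====
-- stage 1: the ±1 prefix-sum sequence of the scores
def pvPrefix (bp : Int) : Int → List Int → List Int
  | _, [] => []
  | s, x :: r =>
    let s' := if x ≥ bp then s + 1 else s - 1
    s' :: pvPrefix bp s' r

-- stage 2: scan with a running minimum m; trigger when v - m reaches tb
def pvScan (tb : Int) : List Int → Int → Bool
  | [], _ => false
  | v :: r, m =>
    let m' := if m > v then v else m
    if v - m' ≥ tb then true else pvScan tb r m'

def generate_judgement_from_preds_alt (preds : List Int) (backup_p99_treshold : Int) (time_buffer_threshold : Int) (iva_release_threshold : Int) : Bool :=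
  pvScan time_buffer_threshold (pvPrefix backup_p99_treshold 0 preds) 0

-- ===== PRECONDITION & SPEC =====
-- Pre_ excludes exactly the inputs on which Python A raises IndexError:
-- nonempty preds with iva_release_threshold ≤ 0 (popleft on an empty deque).
def Pre_generate_judgement_from_preds (preds : List Int) (backup_p99_treshold : Int) (time_buffer_threshold : Int) (iva_release_threshold : Int) : Prop :=
  preds = [] ∨ 1 ≤ iva_release_threshold
instance (preds : List Int) (backup_p99_treshold : Int) (time_buffer_threshold : Int) (iva_release_threshold : Int) : Decidable (Pre_generate_judgement_from_preds preds backup_p99_treshold time_buffer_threshold iva_release_threshold) := by unfold Pre_generate_judgement_from_preds; infer_instance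

def pvWitness_generate_judgement_from_preds : List Int × Int × Int × Int := ([1, 2, 0], 1, 2, 1)

def Spec_generate_judgement_from_preds (preds : List Int) (backup_p99_treshold : Int) (time_buffer_threshold : Int) (iva_release_threshold : Int) (out : Bool) : Prop := out = generate_judgement_from_preds_alt preds backup_p99_treshold time_buffer_threshold iva_release_threshold
instance (preds : List Int) (backup_p99_treshold : Int) (time_buffer_threshold : Int) (iva_release_threshold : Int) (out : Bool) : Decidable (Spec_generate_judgement_from_preds preds backup_p99_treshold time_buffer_threshold iva_release_threshold out) := by unfold Spec_generate_judgement_from_preds; infer_instance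

-- ===== CLAIM (what is proved, stated in full; the proofs are below) =====
def Claim_equal_generate_judgement_from_preds : Prop := ∀ (preds : List Int) (backup_p99_treshold : Int) (time_buffer_threshold : Int) (iva_release_threshold : Int), Dom_generate_judgement_from_preds preds backup_p99_treshold time_buffer_threshold iva_release_threshold → Pre_generate_judgement_from_preds preds backup_p99_treshold time_buffer_threshold iva_release_threshold → Spec_generate_judgement_from_preds preds backup_p99_treshold time_buffer_threshold iva_release_threshold (generate_judgement_from_preds preds backup_p99_treshold time_buffer_threshold iva_release_threshold)

-- ===== LEMMAS AND PROOFS =====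
-- A's trigger flag is false at every loop entry (setting it true breaks), so the
-- deque/release branch never fires; under the invariant tbc = s - m, m ≤ s, A's
-- clamped counter tracks exactly B's prefix-sum-minus-running-minimum scan.
theorem pvALoop_eq_scan (bp tb k : Int) :
    ∀ (rest : List Int) (s m : Int) (deq : List Int), m ≤ s →
      pvALoop bp tb k rest (s - m) false deq = pvScan tb (pvPrefix bp s rest) m := by
  intro rest
  induction rest with
  | nil => intro s m deq _; rfl
  | cons x r ih =>
    intro s m deq h
    simp only [pvALoop, pvPrefix, pvScan, Bool.false_eq_true, false_and, if_false]
    by_cases hx : x ≥ bp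
    · have hm' : (if m > s + 1 then s + 1 else m) = m := by omega
      simp only [hx, if_true, hm']
      by_cases hb : s - m + 1 ≥ tb
      · rw [if_pos hb, if_pos (by omega : s + 1 - m ≥ tb)]
      · rw [if_neg hb, if_neg (by omega : ¬ s + 1 - m ≥ tb)]
        have := ih (s + 1) m (deq.tail ++ [0]) (by omega)
        rw [show s - m + 1 = s + 1 - m by ring] at *
        exact this
    · simp only [hx, if_false]
      by_cases hz : s - m > 0
      · have hm' : (if m > s - 1 then s - 1 else m) = m := by omega
        simp only [if_pos hz, hm']
        by_cases hb : s - m - 1 ≥ tb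
        · rw [if_pos hb, if_pos (by omega : s - 1 - m ≥ tb)]
        · rw [if_neg hb, if_neg (by omega : ¬ s - 1 - m ≥ tb)]
          have := ih (s - 1) m (deq.tail ++ [1]) (by omega)
          rw [show s - m - 1 = s - 1 - m by ring] at *
          exact this
      · have hse : s = m := by omega
        have hm' : (if m > s - 1 then s - 1 else m) = s - 1 := by omega
        simp only [if_neg hz, hm']
        by_cases hb : s - m ≥ tb
        · rw [if_pos hb, if_pos (by omega : s - 1 - (s - 1) ≥ tb)]
        · rw [if_neg hb, if_neg (by omega : ¬ s - 1 - (s - 1) ≥ tb)]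
          have := ih (s - 1) (s - 1) (deq.tail ++ [1]) (by omega)
          rw [show s - m = s - 1 - (s - 1) by omega] at *
          exact this

-- ===== VERDICT (by name: the statement is the Claim_ definition above) =====
theorem generate_judgement_from_preds_spec : Claim_equal_generate_judgement_from_preds := by
  intro preds bp tb k _ _
  unfold Spec_generate_judgement_from_preds generate_judgement_from_preds generate_judgement_from_preds_alt
  have := pvALoop_eq_scan bp tb k preds 0 0 (List.replicate k.toNat 0) le_rfl
  simpa using this
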